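-- pv_equiv track=rewrite | github.com/miliar/Code_Jam_Webscraper | solutions_python/Problem_190/114.py | solve
-- ===== SOURCE A (Python) =====
-- _map = {
--     'R': 'RS',
--     'S': 'PS',
--     'P': 'PR'
-- }
--
-- def solve(N, R, P, S):
--     """ solve the problem """
--
--     for win in ['R', 'P', 'S']:
--         s = win
--         for i in range(N):
--             next_s = ''
--             for c in s:
--                 next_s += _map[c]
--             s = next_s
--         _R = 0
--         _P = 0
--         _S = 0
--         for c in s:
--             if c == 'R': _R += 1
--             if c == 'P': _P += 1
--             if c == 'S': _S += 1
--         if R == _R and P == _P and S == _S: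
--             for i in range(N):
--                 next_s = ''
--                 cur = 0
--                 interval = 2**i
--                 while cur < 2**N:
--                     left = s[cur:cur+interval]
--                     right = s[cur+interval:cur+interval*2]
--                     if left < right:
--                         next_s += left + right
--                     else:
--                         next_s += right + left
--                     cur += 2 * interval
--                 s = next_s
--
--             return s
--
--     return 'IMPOSSIBLE'
-- ===== SOURCE B (Python) =====
-- # Alternative decomposition: one top-down recursion builds the canonical bracket
-- # string directly, instead of A's expand-all + count + N bottom-up merge passes.
-- _loser = {'R': 'S', 'P': 'R', 'S': 'P'}
--
-- def canon(win, n):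
--     """canonical bracket string for a depth-n tournament won by `win`"""
--     if n <= 0:
--         return win
--     a = canon(win, n - 1)
--     b = canon(_loser[win], n - 1)
--     return a + b if a < b else b + a
--
-- def solve(N, R, P, S):
--     for win in ['R', 'P', 'S']:
--         cs = canon(win, N)
--         if cs.count('R') == R and cs.count('P') == P and cs.count('S') == S:
--             return cs
--     return 'IMPOSSIBLE'
-- ===== Notes on version B (the rewrite author's own statement) =====
-- stated objective: alternative
-- what changed: Replaces A's iterative string expansion, separate counting loop and N bottom-up merge passes with a single top-down divide-and-conquer recursion canon(win,n) that builds the canonical bracket string directly (canon(win,n)=min-concat of canon(win,n-1) and canon(loser(win),n-1)).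
import Mathlib
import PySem

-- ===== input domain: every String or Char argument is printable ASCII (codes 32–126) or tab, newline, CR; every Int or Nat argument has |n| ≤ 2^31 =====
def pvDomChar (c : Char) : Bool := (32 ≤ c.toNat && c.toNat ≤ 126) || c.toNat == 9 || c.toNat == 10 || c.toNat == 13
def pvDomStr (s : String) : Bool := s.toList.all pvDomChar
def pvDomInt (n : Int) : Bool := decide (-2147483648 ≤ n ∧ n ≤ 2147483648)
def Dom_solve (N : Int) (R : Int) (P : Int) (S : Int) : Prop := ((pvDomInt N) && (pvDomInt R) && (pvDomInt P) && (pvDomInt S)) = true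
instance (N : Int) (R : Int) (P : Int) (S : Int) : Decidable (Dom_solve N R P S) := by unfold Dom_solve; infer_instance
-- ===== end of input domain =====

-- B replaces A's expand-all + count + N bottom-up merge passes by one top-down
-- divide-and-conquer recursion building the canonical string directly (objective: alternative).

-- ===== PORT A =====

-- Python's `<` on strings (lexicographic by code point; a strict prefix is smaller).
-- Shared by both ports (both compare strings with `<`).
def pyStrLt : List Char → List Char → Bool
  | _, [] => false
  | [], _ :: _ => true
  | a :: as, b :: bs => if a < b then true else if b < a then false else pyStrLt as bs

-- `_map[c]`: lookup in the module dict _map; in A, c is always 'R', 'S' or 'P'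
-- (strings produced by the map itself), so the final branch is the 'P' entry and
-- the KeyError case is unreachable.
def mapA (c : Char) : List Char :=
  if c = 'R' then ['R', 'S'] else if c = 'S' then ['P', 'S'] else ['P', 'R']

-- `next_s = ''; for c in s: next_s += _map[c]`
def expandOnce (s : List Char) : List Char :=
  s.foldl (fun acc c => acc ++ mapA c) []

-- the counting loop (three independent `if`s over one pass)
def countsA (s : List Char) : Int × Int × Int :=
  s.foldl (fun t c =>
    (if c = 'R' then t.1 + 1 else t.1,
     if c = 'P' then t.2.1 + 1 else t.2.1,
     if c = 'S' then t.2.2 + 1 else t.2.2)) (0, 0, 0)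

-- the `while cur < 2**N` merge loop; the `0 < interval` guard only makes the
-- recursion total (in A interval = 2**i ≥ 1 always; Python would loop forever otherwise)
def mergeWhile (s : List Char) (bound interval cur : Int) (acc : List Char) : List Char :=
  if hws : cur < bound ∧ 0 < interval then
    let left := PySem.List.slice s (some cur) (some (cur + interval))
    let right := PySem.List.slice s (some (cur + interval)) (some (cur + interval * 2))
    mergeWhile s bound interval (cur + 2 * interval)
      (if pyStrLt left right then acc ++ (left ++ right) else acc ++ (right ++ left))
  else acc
termination_by (bound - cur).toNat
decreasing_by omega

-- one iteration of the `for win in ['R','P','S']` body: `None` = no `return` taken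
def tryA (N R P S : Int) (win : Char) : Option (List Char) :=
  let s := (PySem.List.pyRange 0 N 1).foldl (fun s _ => expandOnce s) [win]
  let cnt := countsA s
  if R = cnt.1 ∧ P = cnt.2.1 ∧ S = cnt.2.2 then
    some ((PySem.List.pyRange 0 N 1).foldl
      (fun s i => mergeWhile s ((2 : Int) ^ N.toNat) ((2 : Int) ^ i.toNat) 0 []) s)
  else none

def solve (N : Int) (R : Int) (P : Int) (S : Int) : String :=
  match tryA N R P S 'R' with
  | some s => String.ofList s
  | none =>
    match tryA N R P S 'P' with
    | some s => String.ofList s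
    | none =>
      match tryA N R P S 'S' with
      | some s => String.ofList s
      | none => "IMPOSSIBLE"

-- ===== PORT B =====

-- `_loser[win]` (keys 'R','P','S'; KeyError unreachable: win is always one of them)
def loserB (c : Char) : Char :=
  if c = 'R' then 'S' else if c = 'P' then 'R' else 'P'

-- `canon(win, n)`
def canonB (win : Char) (n : Int) : List Char :=
  if h : n ≤ 0 then [win]
  else
    let a := canonB win (n - 1)
    let b := canonB (loserB win) (n - 1)
    if pyStrLt a b then a ++ b else b ++ a
termination_by n.toNat
decreasing_by all_goals omega

-- one iteration of B's winner loop
def tryB (N R P S : Int) (win : Char) : Option (List Char) :=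
  let cs := canonB win N
  if (PySem.List.count cs 'R' : Int) = R ∧ (PySem.List.count cs 'P' : Int) = P ∧
     (PySem.List.count cs 'S' : Int) = S then some cs
  else none

def solve_alt (N : Int) (R : Int) (P : Int) (S : Int) : String :=
  match tryB N R P S 'R' with
  | some s => String.ofList s
  | none =>
    match tryB N R P S 'P' with
    | some s => String.ofList s
    | none =>
      match tryB N R P S 'S' with
      | some s => String.ofList s
      | none => "IMPOSSIBLE"

-- ===== PRECONDITION & SPEC =====
def Spec_solve (N : Int) (R : Int) (P : Int) (S : Int) (out : String) : Prop := out = solve_alt N R P S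
instance (N : Int) (R : Int) (P : Int) (S : Int) (out : String) : Decidable (Spec_solve N R P S out) := by unfold Spec_solve; infer_instance

-- ===== CLAIM (what is proved, stated in full; the proofs are below) =====
def Claim_equal_solve : Prop := ∀ (N : Int) (R : Int) (P : Int) (S : Int), Dom_solve N R P S → Spec_solve N R P S (solve N R P S)

-- ===== LEMMAS AND PROOFS =====

-- which characters ever occur as the winner argument
def RPSok (c : Char) : Prop := c = 'R' ∨ c = 'P' ∨ c = 'S'

-- proof-side views: n-fold expansion of one char, and a Nat-indexed canon
def X (n : Nat) (c : Char) : List Char := expandOnce^[n] [c]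

def canonN : Char → Nat → List Char
  | c, 0 => [c]
  | c, n + 1 =>
    let a := canonN c n
    let b := canonN (loserB c) n
    if pyStrLt a b then a ++ b else b ++ a

-- chunked view of one merge pass: k chunks of 2*I chars, consumed from the front
def mwN (s : List Char) (I : Nat) : Nat → List Char → List Char
  | 0, acc => acc
  | k + 1, acc =>
    let L := s.take I
    let R := (s.drop I).take I
    mwN (s.drop (2 * I)) I k (acc ++ (if pyStrLt L R then L ++ R else R ++ L))

theorem pyStrLt_asymm : ∀ a b : List Char, pyStrLt a b = true → pyStrLt b a = false := by
  intro a
  induction a with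
  | nil => intro b h; cases b <;> simp [pyStrLt] at *
  | cons x xs ih =>
    intro b h
    cases b with
    | nil => simp [pyStrLt] at h
    | cons y ys =>
      rcases lt_trichotomy x y with hlt | heq | hgt
      · simp [pyStrLt, lt_asymm hlt, hlt]
      · simp only [pyStrLt, heq, lt_irrefl, if_false] at h ⊢
        exact ih ys h
      · simp [pyStrLt, lt_asymm hgt, hgt] at h

theorem pyStrLt_conn : ∀ a b : List Char, pyStrLt a b = false → pyStrLt b a = false → a = b := by
  intro a
  induction a with
  | nil => intro b h1 h2; cases b <;> simp [pyStrLt] at *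
  | cons x xs ih =>
    intro b h1 h2
    cases b with
    | nil => simp [pyStrLt] at h2
    | cons y ys =>
      rcases lt_trichotomy x y with hlt | heq | hgt
      · simp [pyStrLt, hlt] at h1
      · subst heq
        simp only [pyStrLt, lt_irrefl, if_false] at h1 h2
        rw [ih ys h1 h2]
      · simp [pyStrLt, hgt] at h2

theorem mincat_comm (a b : List Char) :
    (if pyStrLt a b then a ++ b else b ++ a) = (if pyStrLt b a then b ++ a else a ++ b) := by
  rcases h : pyStrLt a b with hf | ht
  · rcases h2 : pyStrLt b a with _ | _
    · rw [pyStrLt_conn a b h h2]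
    · simp
  · rw [pyStrLt_asymm a b h]
    simp

theorem expandOnce_eq (s : List Char) : expandOnce s = s.flatMap mapA := by
  unfold expandOnce
  rw [PySem.List.foldl_append_eq_flatMap mapA s []]
  rfl
theorem expandOnce_append (u v : List Char) :
    expandOnce (u ++ v) = expandOnce u ++ expandOnce v := by
  simp [expandOnce_eq]
theorem X_append (n : Nat) (u v : List Char) :
    expandOnce^[n] (u ++ v) = expandOnce^[n] u ++ expandOnce^[n] v := by
  induction n generalizing u v with
  | zero => simp
  | succ n ih => simp [Function.iterate_succ_apply, expandOnce_append, ih]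

theorem X_succ (n : Nat) (c : Char) :
    X (n + 1) c = X n (mapA c).head! ++ X n (mapA c).tail.head! := by
  unfold X
  rw [Function.iterate_succ_apply]
  have h1 : expandOnce [c] = mapA c := by simp [expandOnce_eq]
  rw [h1]
  unfold mapA
  split_ifs <;>
    simpa using X_append n [_] [_]

theorem X_length (n : Nat) (c : Char) (h : RPSok c) : (X n c).length = 2 ^ n := by
  induction n generalizing c with
  | zero => simp [X]
  | succ n ih =>
    rw [X_succ, List.length_append]
    have hR : RPSok (mapA c).head! ∧ RPSok (mapA c).tail.head! := by
      rcases h with h | h | h <;> subst h <;> exact ⟨by simp [mapA, RPSok], by simp [mapA, RPSok]⟩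
    rw [ih _ hR.1, ih _ hR.2]
    ring

theorem loser_ok (c : Char) (h : RPSok c) : RPSok (loserB c) := by
  rcases h with h | h | h <;> subst h <;> simp [loserB, RPSok]

theorem canonN_succ (c : Char) (n : Nat) :
    canonN c (n + 1) = if pyStrLt (canonN c n) (canonN (loserB c) n)
      then canonN c n ++ canonN (loserB c) n else canonN (loserB c) n ++ canonN c n := rfl

theorem canonN_perm (n : Nat) (c : Char) (h : RPSok c) : (canonN c n).Perm (X n c) := by
  induction n generalizing c with
  | zero => simp [canonN, X]
  | succ n ih =>
    have hperm : (canonN c (n+1)).Perm (canonN c n ++ canonN (loserB c) n) := by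
      rw [canonN_succ]
      split_ifs
      · exact List.Perm.refl _
      · exact List.perm_append_comm
    refine hperm.trans ?_
    have h2 := (ih c h).append (ih (loserB c) (loser_ok c h))
    refine h2.trans ?_
    rw [X_succ]
    rcases h with h | h | h <;> subst h <;>
      first
        | exact List.Perm.refl _
        | exact List.perm_append_comm

theorem canonN_length (n : Nat) (c : Char) (h : RPSok c) : (canonN c n).length = 2 ^ n := by
  rw [(canonN_perm n c h).length_eq, X_length n c h]

theorem canonB_eq (N : Int) (c : Char) : canonB c N = canonN c N.toNat := by
  by_cases hN : N ≤ 0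
  · rw [canonB]
    simp [hN, show N.toNat = 0 by omega, canonN]
  · have h1 : (N - 1).toNat + 1 = N.toNat := by omega
    rw [canonB]
    simp only [hN, dif_neg, not_false_iff]
    rw [canonB_eq (N-1) c, canonB_eq (N-1) (loserB c), ← h1]
    rfl
termination_by N.toNat
decreasing_by all_goals omega

theorem countsA_go (s : List Char) : ∀ (r p q : Int),
    s.foldl (fun t c =>
      (if c = 'R' then t.1 + 1 else t.1,
       if c = 'P' then t.2.1 + 1 else t.2.1,
       if c = 'S' then t.2.2 + 1 else t.2.2)) (r, p, q)
    = (r + (s.count 'R' : Int), p + (s.count 'P' : Int), q + (s.count 'S' : Int)) := by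
  induction s with
  | nil => simp
  | cons c s ih =>
    intro r p q
    simp only [List.foldl_cons, ih, List.count_cons, beq_iff_eq]
    refine Prod.ext ?_ (Prod.ext ?_ ?_) <;> simp <;> split_ifs <;> omega

theorem countsA_eq (s : List Char) :
    countsA s = ((s.count 'R' : Int), (s.count 'P' : Int), (s.count 'S' : Int)) := by
  simpa using countsA_go s 0 0 0

theorem foldl_const_iterate {α β : Type} (f : α → α) : ∀ (l : List β) (a : α),
    l.foldl (fun s _ => f s) a = f^[l.length] a := by
  intro l
  induction l with
  | nil => intro a; rfl
  | cons x xs ih => intro a; simp [ih, Function.iterate_succ_apply]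

theorem mwN_succ (s : List Char) (I k : Nat) (acc : List Char) :
    mwN s I (k + 1) acc = mwN (s.drop (2 * I)) I k
      (acc ++ (if pyStrLt (s.take I) ((s.drop I).take I)
        then s.take I ++ (s.drop I).take I else (s.drop I).take I ++ s.take I)) := rfl

theorem mwN_acc (I : Nat) : ∀ (k : Nat) (s acc : List Char), mwN s I k acc = acc ++ mwN s I k [] := by
  intro k
  induction k with
  | zero => intro s acc; simp [mwN]
  | succ k ih =>
    intro s acc
    rw [mwN_succ, mwN_succ, ih _ (acc ++ _), ih _ ([] ++ _)]
    simp

theorem mwN_len (I : Nat) : ∀ (k : Nat) (s : List Char), 2 * I * k ≤ s.length →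
    (mwN s I k []).length = 2 * I * k := by
  intro k
  induction k with
  | zero => intro s h; simp [mwN]
  | succ k ih =>
    intro s h
    rw [Nat.mul_succ] at h
    rw [mwN_succ, mwN_acc]
    have h1 : (s.take I).length = I := by simp; omega
    have h2 : ((s.drop I).take I).length = I := by simp; omega
    have h3 : (s.drop (2*I)).length = s.length - 2*I := by simp
    rw [List.length_append, ih (s.drop (2*I)) (by simp; omega)]
    rw [Nat.mul_succ]
    split_ifs <;> simp [h1, h2] <;> omega

theorem mwN_append (I : Nat) : ∀ (k1 : Nat) (k2 : Nat) (u v acc : List Char),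
    u.length = 2 * I * k1 →
    mwN (u ++ v) I (k1 + k2) acc = mwN v I k2 (mwN u I k1 acc) := by
  intro k1
  induction k1 with
  | zero =>
    intro k2 u v acc h
    have : u = [] := List.eq_nil_of_length_eq_zero (by omega)
    subst this
    simp [mwN]
  | succ k1 ih =>
    intro k2 u v acc h
    rw [Nat.mul_succ] at h
    have hIu : I ≤ u.length := by omega
    have hIu2 : 2 * I ≤ u.length := by omega
    have hIdrop : I ≤ (u.drop I).length := by simp; omega
    have e1 : (u ++ v).take I = u.take I := List.take_append_of_le_length hIu
    have e2 : (u ++ v).drop I = u.drop I ++ v := List.drop_append_of_le_length hIu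
    have e3 : (u.drop I ++ v).take I = (u.drop I).take I := List.take_append_of_le_length hIdrop
    have e4 : (u ++ v).drop (2 * I) = u.drop (2 * I) ++ v := List.drop_append_of_le_length hIu2
    have hlen' : (u.drop (2*I)).length = 2 * I * k1 := by simp; omega
    have hk : k1 + 1 + k2 = (k1 + k2) + 1 := by omega
    rw [hk, mwN_succ, e1, e2, e3, e4, mwN_succ]
    exact ih k2 (u.drop (2*I)) v _ hlen'

theorem mergeWhile_eq_mwN (s : List Char) (I : Nat) (hI : 0 < I) :
    ∀ (k cur : Nat) (acc : List Char),
    mergeWhile s ((cur : Int) + 2 * (I : Int) * (k : Int)) (I : Int) (cur : Int) acc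
      = mwN (s.drop cur) I k acc := by
  intro k
  induction k with
  | zero =>
    intro cur acc
    rw [mergeWhile]
    rw [dif_neg (by push_cast; omega)]
    rfl
  | succ k ih =>
    intro cur acc
    rw [mergeWhile, dif_pos (by push_cast; constructor <;> [nlinarith; omega])]
    have eL : PySem.List.slice s (some (cur : Int)) (some ((cur : Int) + (I : Int)))
        = (s.drop cur).take I := PySem.List.slice_natCast_add s cur I
    have ecast : ((cur : Int) + (I : Int) * 2) = ((cur + I : Nat) : Int) + ((I : Nat) : Int) := by
      push_cast; ring
    have ecast2 : ((cur : Int) + (I : Int)) = ((cur + I : Nat) : Int) := by push_cast; ring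
    have eR : PySem.List.slice s (some ((cur : Int) + (I : Int))) (some ((cur : Int) + (I : Int) * 2))
        = ((s.drop cur).drop I).take I := by
      rw [ecast, ecast2, PySem.List.slice_natCast_add s (cur + I) I, List.drop_drop]
    have ebound : ((cur : Int) + 2 * (I : Int) * ((k : Int) + 1))
        = (((cur + 2 * I : Nat) : Int) + 2 * (I : Int) * (k : Int)) := by push_cast; ring
    have ecur : ((cur : Int) + 2 * (I : Int)) = ((cur + 2 * I : Nat) : Int) := by push_cast; ring
    simp only [eL, eR]
    push_cast
    rw [show ((cur : Int) + 2 * (I : Int) * ((k : Int) + 1)) = (((cur + 2 * I : Nat) : Int) + 2 * (I : Int) * (k : Int)) by push_cast; ring,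
        show ((cur : Int) + 2 * (I : Int)) = ((cur + 2 * I : Nat) : Int) by push_cast; ring]
    rw [ih (cur + 2 * I) _]
    rw [mwN_succ]
    rw [show (s.drop cur).drop (2 * I) = s.drop (cur + 2 * I) by rw [List.drop_drop, Nat.add_comm]]
    split_ifs <;> rfl

theorem pow_split (n i : Nat) (hi : i < n) : 2 * 2 ^ i * 2 ^ (n - 1 - i) = 2 ^ n := by
  have : 1 + i + (n - 1 - i) = n := by omega
  calc 2 * 2 ^ i * 2 ^ (n - 1 - i) = 2 ^ (1 + i + (n - 1 - i)) := by
        rw [Nat.pow_add, Nat.pow_add, Nat.pow_one]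
    _ = 2 ^ n := by rw [this]

theorem passes_split (n : Nat) : ∀ (l : List Nat), (∀ i ∈ l, i < n) →
    ∀ (u v : List Char), u.length = 2 ^ n → v.length = 2 ^ n →
    l.foldl (fun s i => mwN s (2 ^ i) (2 ^ (n - i)) []) (u ++ v)
      = l.foldl (fun s i => mwN s (2 ^ i) (2 ^ (n - 1 - i)) []) u
        ++ l.foldl (fun s i => mwN s (2 ^ i) (2 ^ (n - 1 - i)) []) v := by
  intro l
  induction l with
  | nil => intro _ u v _ _; rfl
  | cons i l ih =>
    intro hmem u v hu hv
    have hi : i < n := hmem i (List.mem_cons_self ..)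
    have hsplit : (2 : Nat) ^ (n - i) = 2 ^ (n - 1 - i) + 2 ^ (n - 1 - i) := by
      have h1 : n - i = (n - 1 - i) + 1 := by omega
      rw [h1, Nat.pow_succ]
      ring
    have hulen : u.length = 2 * 2 ^ i * 2 ^ (n - 1 - i) := by rw [hu, pow_split n i hi]
    have hvlen : v.length = 2 * 2 ^ i * 2 ^ (n - 1 - i) := by rw [hv, pow_split n i hi]
    simp only [List.foldl_cons]
    rw [hsplit, mwN_append (2 ^ i) _ _ u v [] hulen, mwN_acc]
    have hlu : (mwN u (2 ^ i) (2 ^ (n - 1 - i)) []).length = 2 ^ n := by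
      rw [mwN_len _ _ u (le_of_eq hulen.symm), pow_split n i hi]
    have hlv : (mwN v (2 ^ i) (2 ^ (n - 1 - i)) []).length = 2 ^ n := by
      rw [mwN_len _ _ v (le_of_eq hvlen.symm), pow_split n i hi]
    exact ih (fun j hj => hmem j (List.mem_cons_of_mem _ hj)) _ _ hlu hlv

theorem mwN_one (u v : List Char) (I : Nat) (hu : u.length = I) (hv : v.length = I) :
    mwN (u ++ v) I 1 [] = if pyStrLt u v then u ++ v else v ++ u := by
  rw [mwN_succ]
  have e1 : (u ++ v).take I = u := by rw [List.take_append_of_le_length (le_of_eq hu.symm), ← hu, List.take_length]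
  have e2 : (u ++ v).drop I = v := by
    rw [List.drop_append_of_le_length (le_of_eq hu.symm), ← hu, List.drop_length, List.nil_append]
  rw [e1, e2, ← hv, List.take_length, hv]
  simp [mwN]

theorem passes_canon (n : Nat) : ∀ (c : Char), RPSok c →
    (List.range n).foldl (fun s i => mwN s (2 ^ i) (2 ^ (n - 1 - i)) []) (X n c) = canonN c n := by
  induction n with
  | zero => intro c _; rfl
  | succ n ih =>
    intro c hc
    rw [List.range_succ, List.foldl_append]
    have hbig : ∀ (s : List Char) (i : Nat), i ∈ List.range n →
        mwN s (2 ^ i) (2 ^ (n + 1 - 1 - i)) [] = mwN s (2 ^ i) (2 ^ (n - i)) [] := by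
      intro s i hi
      have : n + 1 - 1 - i = n - i := by omega
      rw [this]
    rw [PySem.List.foldl_congr_mem (List.range n) _ _ _ (fun s i hi => hbig s i hi)]
    rcases hc with h | h | h <;> subst h
    · -- 'R' : X (n+1) 'R' = X n 'R' ++ X n 'S'
      rw [X_succ]
      have hmem : ∀ i ∈ List.range n, i < n := fun i hi => List.mem_range.mp hi
      rw [passes_split n _ hmem _ _ (X_length n _ (by simp [RPSok, mapA])) (X_length n _ (by simp [RPSok, mapA]))]
      rw [ih _ (by simp [RPSok, mapA]), ih _ (by simp [RPSok, mapA])]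
      show mwN _ (2 ^ n) (2 ^ (n + 1 - 1 - n)) [] = _
      rw [show n + 1 - 1 - n = 0 by omega, pow_zero]
      rw [mwN_one _ _ _ (canonN_length n _ (by simp [RPSok, mapA])) (canonN_length n _ (by simp [RPSok, mapA]))]
      rw [canonN_succ]
      rfl
    · rw [X_succ]
      have hmem : ∀ i ∈ List.range n, i < n := fun i hi => List.mem_range.mp hi
      rw [passes_split n _ hmem _ _ (X_length n _ (by simp [RPSok, mapA])) (X_length n _ (by simp [RPSok, mapA]))]
      rw [ih _ (by simp [RPSok, mapA]), ih _ (by simp [RPSok, mapA])]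
      show mwN _ (2 ^ n) (2 ^ (n + 1 - 1 - n)) [] = _
      rw [show n + 1 - 1 - n = 0 by omega, pow_zero]
      rw [mwN_one _ _ _ (canonN_length n _ (by simp [RPSok, mapA])) (canonN_length n _ (by simp [RPSok, mapA]))]
      rw [canonN_succ]
      rfl
    · -- 'S' : halves come swapped; use mincat_comm
      rw [X_succ]
      have hmem : ∀ i ∈ List.range n, i < n := fun i hi => List.mem_range.mp hi
      rw [passes_split n _ hmem _ _ (X_length n _ (by simp [RPSok, mapA])) (X_length n _ (by simp [RPSok, mapA]))]
      rw [ih _ (by simp [RPSok, mapA]), ih _ (by simp [RPSok, mapA])]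
      show mwN _ (2 ^ n) (2 ^ (n + 1 - 1 - n)) [] = _
      rw [show n + 1 - 1 - n = 0 by omega, pow_zero]
      rw [mwN_one _ _ _ (canonN_length n _ (by simp [RPSok, mapA])) (canonN_length n _ (by simp [RPSok, mapA]))]
      rw [canonN_succ]
      show (if pyStrLt (canonN 'P' n) (canonN 'S' n) then _ else _) = _
      rw [mincat_comm]
      rfl

theorem expandFold_eq (N : Int) (c : Char) :
    (PySem.List.pyRange 0 N 1).foldl (fun s _ => expandOnce s) [c] = X N.toNat c := by
  rw [foldl_const_iterate, PySem.List.length_pyRange_one]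
  simp [X]

theorem mergePhase_eq (N : Int) (c : Char) (h : RPSok c) :
    (PySem.List.pyRange 0 N 1).foldl
      (fun s i => mergeWhile s ((2 : Int) ^ N.toNat) ((2 : Int) ^ i.toNat) 0 []) (X N.toNat c)
      = canonN c N.toNat := by
  by_cases hN : N ≤ 0
  · rw [PySem.List.pyRange_one_eq_nil hN]
    rw [show N.toNat = 0 by omega]
    rfl
  · obtain ⟨n, rfl⟩ : ∃ n : Nat, N = (n : Int) := ⟨N.toNat, by omega⟩
    rw [show ((n : Int) : Int).toNat = n by simp]
    rw [PySem.List.pyRange_zero_natCast, List.foldl_map]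
    rw [PySem.List.foldl_congr_mem (List.range n)
      (fun s (k : Nat) => mergeWhile s ((2 : Int) ^ n) ((2 : Int) ^ ((k : Int)).toNat) 0 [])
      (fun s (k : Nat) => mwN s (2 ^ k) (2 ^ (n - 1 - k)) []) (X n c) ?_]
    · exact passes_canon n c h
    · intro s k hk
      have hkn : k < n := List.mem_range.mp hk
      have e1 : ((k : Int)).toNat = k := by simp
      have e2 : ((2 : Int) ^ k) = ((2 ^ k : Nat) : Int) := by push_cast; ring
      have e3 : ((2 : Int) ^ n) = ((0 : Nat) : Int) + 2 * ((2 ^ k : Nat) : Int) * ((2 ^ (n - 1 - k) : Nat) : Int) := by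
        push_cast
        rw [show (0:Int) + 2 * (2:Int) ^ k * (2:Int) ^ (n - 1 - k) = ((2 * 2 ^ k * 2 ^ (n-1-k) : Nat) : Int) by push_cast; ring]
        rw [pow_split n k hkn]
        norm_cast
      show mergeWhile s ((2 : Int) ^ n) ((2 : Int) ^ ((k : Int)).toNat) 0 [] = mwN s (2 ^ k) (2 ^ (n - 1 - k)) []
      rw [e1, e2, e3]
      have := mergeWhile_eq_mwN s (2 ^ k) (Nat.two_pow_pos k) (2 ^ (n - 1 - k)) 0 []
      simpa using this

theorem tryA_eq_tryB (N R P S : Int) (c : Char) (h : RPSok c) :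
    tryA N R P S c = tryB N R P S c := by
  simp only [tryA, tryB]
  rw [expandFold_eq, canonB_eq, countsA_eq]
  have hcnt : ∀ d : Char, (canonN c N.toNat).count d = (X N.toNat c).count d :=
    fun d => (canonN_perm N.toNat c h).count_eq d
  simp only [PySem.List.count_eq, hcnt]
  have hiff : (R = ((X N.toNat c).count 'R' : Int) ∧ P = ((X N.toNat c).count 'P' : Int) ∧
      S = ((X N.toNat c).count 'S' : Int)) ↔
      (((X N.toNat c).count 'R' : Int) = R ∧ ((X N.toNat c).count 'P' : Int) = P ∧
      ((X N.toNat c).count 'S' : Int) = S) := by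
    constructor <;> rintro ⟨h1, h2, h3⟩ <;> exact ⟨h1.symm, h2.symm, h3.symm⟩
  split_ifs with h1 h2 h2
  · rw [mergePhase_eq N c h]
  · exact absurd (hiff.mp h1) h2
  · exact absurd (hiff.mpr h2) h1
  · rfl

-- ===== VERDICT (by name: the statement is the Claim_ definition above) =====
theorem solve_spec : Claim_equal_solve := by
  intro N R P S _
  unfold Spec_solve solve solve_alt
  rw [tryA_eq_tryB N R P S 'R' (Or.inl rfl),
      tryA_eq_tryB N R P S 'P' (Or.inr (Or.inl rfl)),
      tryA_eq_tryB N R P S 'S' (Or.inr (Or.inr rfl))]
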